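-- pv_equiv track=rewrite | github.com/edoardottt/programming-fundamentals | Workbook/Dictionaries/Dicts_9/program.py | es37
-- ===== SOURCE A (Python) =====
-- def es37(listaDizionari):
--     """
--     Si implementi la funzione es37(listaDizionari) che presi in input una lista di dizionari
--     restituisce  un dizionario.
--     I dizionari della listaDizionari  hanno come  chiave stringhe di caratteri tra 'a' e 'z'
--     e come attributo liste di interi.
--
--     Il dizionario restituito deve avere come chiavi le chiavi  comuni ad almeno la meta' dei
--     dizionari della lista.
--     A ciascuna chiave x di questo dizionario e' associato un insieme.
--     Un intero deve essere presente nell'insieme associato ad x se e solo se compare come attributo di x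
--     in almeno uno dei dizionari della listaDizionari.
--     Ad esempio se la listaDizionari contenente i tre dizionari
--     {'a': [1,3,5],'b':[2,3 ],'d':[3]},
--     {'a':[5,1,2,3], 'b':[2],'d':[3]},
--     {'a':[3,5], 'c':[4,1,2],'d':[4]}
--     il dizionario restituito sara' {'a':{1,2,3,5},'b':{2,3},'d':{3,4}}
--     """
--     meta = len(listaDizionari) / 2
--     d = {}
--     c = []
--     for elem in listaDizionari:
--         c.extend(elem.keys())
--     keys = []
--     for key in c:
--         ok = good(meta, key, listaDizionari)
--         if ok:
--             keys.append(key)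
--     for key in keys:
--         sett = set()
--         for diz in listaDizionari:
--             if key in diz:
--                 sett = sett | set(diz[key])
--         d[key] = sett
--     return d
--
-- def good(meta, key, listaDizionari):
--     count = 0
--     for elem in listaDizionari:
--         if key in elem:
--             count += 1
--     return count >= meta
-- ===== SOURCE B (Python) =====
-- def es37(listaDizionari):
--     n = len(listaDizionari)
--     count = {}
--     union = {}
--     for diz in listaDizionari:
--         for k, v in diz.items():
--             count[k] = count.get(k, 0) + 1
--             if k in union:
--                 union[k] = union[k] | set(v)
--             else:
--                 union[k] = set(v)
--     return {k: s for k, s in union.items() if 2 * count[k] >= n}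
-- ===== Notes on version B (the rewrite author's own statement) =====
-- stated objective: faster
-- what changed: B makes a single pass over all (key, value) pairs, maintaining one occurrence-counter dict and one running-union dict, instead of A's per-key rescans of the whole dict list (a membership-count scan per collected key plus a union scan per kept key).
import Mathlib
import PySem

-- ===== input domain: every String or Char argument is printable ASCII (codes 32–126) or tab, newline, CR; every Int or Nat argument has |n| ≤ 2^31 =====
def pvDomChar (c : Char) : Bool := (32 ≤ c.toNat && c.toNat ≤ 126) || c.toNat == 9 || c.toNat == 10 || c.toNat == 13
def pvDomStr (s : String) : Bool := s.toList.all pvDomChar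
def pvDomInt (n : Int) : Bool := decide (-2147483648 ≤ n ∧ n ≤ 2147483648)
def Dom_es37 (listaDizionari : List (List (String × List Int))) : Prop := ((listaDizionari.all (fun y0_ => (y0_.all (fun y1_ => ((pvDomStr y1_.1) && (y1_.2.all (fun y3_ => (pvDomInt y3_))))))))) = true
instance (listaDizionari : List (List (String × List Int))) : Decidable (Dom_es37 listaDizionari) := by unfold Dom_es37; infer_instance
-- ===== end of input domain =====

-- B replaces A's O(K·n) repeated scans over the dict list by one pass that counts key
-- occurrences and accumulates the set unions (objective: faster, asymptotic).


-- ===== PORT A =====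
-- Python's 'count >= meta' with meta = len(listaDizionari)/2 (a float, exact for list
-- lengths far below 2^52) is ported exactly as 2*count ≥ len.
def es37_good (n : Nat) (key : String) (listaDizionari : List (List (String × List Int))) : Bool :=
  let count : Int := listaDizionari.foldl
    (fun c elem => if (PySem.Dict.mk elem).contains key then c + 1 else c) 0
  decide (2 * count ≥ (n : Int))

def es37 (listaDizionari : List (List (String × List Int))) : List (String × List Int) :=
  let c := listaDizionari.foldl (fun acc elem => acc ++ (PySem.Dict.mk elem).keys) []
  let keys := c.foldl
    (fun ks key => if es37_good listaDizionari.length key listaDizionari then ks ++ [key] else ks) []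
  let d := keys.foldl (fun d key =>
      let sett := listaDizionari.foldl (fun s diz =>
          if (PySem.Dict.mk diz).contains key then
            PySem.Set.union s (PySem.Set.ofList ((PySem.Dict.mk diz).getD key []))
          else s)
        PySem.Set.empty
      d.insert key sett)
    PySem.Dict.empty
  d.items

-- ===== PORT B =====
def es37_alt (listaDizionari : List (List (String × List Int))) : List (String × List Int) :=
  let n := listaDizionari.length
  let st := listaDizionari.foldl (fun st diz =>
      diz.foldl (fun st kv =>
          (st.1.insert kv.1 (st.1.getD kv.1 0 + 1),
           if st.2.contains kv.1 then
             st.2.insert kv.1 (PySem.Set.union (st.2.getD kv.1 []) (PySem.Set.ofList kv.2))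
           else
             st.2.insert kv.1 (PySem.Set.ofList kv.2))) st)
    ((PySem.Dict.empty, PySem.Dict.empty) : PySem.Dict String Int × PySem.Dict String (PySem.Set Int))
  st.2.items.filter (fun p => decide (2 * st.1.getD p.1 0 ≥ (n : Int)))

-- ===== PRECONDITION & SPEC =====
-- Pre_ excludes inputs whose inner association lists carry a duplicated key: such lists do
-- not represent any Python dict (A's inputs are dicts, which always have distinct keys),
-- so no behaviour of the Python A corresponds to them. A itself is total.
def Pre_es37 (listaDizionari : List (List (String × List Int))) : Prop :=
  ∀ diz ∈ listaDizionari, (diz.map Prod.fst).Nodup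
instance (listaDizionari : List (List (String × List Int))) : Decidable (Pre_es37 listaDizionari) := by unfold Pre_es37; infer_instance

def pvWitness_es37 : (List (List (String × List Int))) :=
  [[("a", [1, 3, 5]), ("b", [2, 3]), ("d", [3])],
   [("a", [5, 1, 2, 3]), ("b", [2]), ("d", [3])],
   [("a", [3, 5]), ("c", [4, 1, 2]), ("d", [4])]]

def Spec_es37 (listaDizionari : List (List (String × List Int))) (out : List (String × List Int)) : Prop := out = es37_alt listaDizionari
instance (listaDizionari : List (List (String × List Int))) (out : List (String × List Int)) : Decidable (Spec_es37 listaDizionari out) := by unfold Spec_es37; infer_instance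

-- ===== CLAIM (what is proved, stated in full; the proofs are below) =====
def Claim_equal_es37 : Prop := ∀ (listaDizionari : List (List (String × List Int))), Dom_es37 listaDizionari → Pre_es37 listaDizionari → Spec_es37 listaDizionari (es37 listaDizionari)

-- ===== LEMMAS AND PROOFS =====

-- The flattened key stream and the per-key union fold both programs reduce to.
def pvKS (ld : List (List (String × List Int))) : List String := (ld.flatMap id).map Prod.fst

def pvStep (k : String) (s : PySem.Set Int) (p : String × List Int) : PySem.Set Int :=
  if p.1 == k then PySem.Set.union s (PySem.Set.ofList p.2) else s

def pvU (ld : List (List (String × List Int))) (k : String) : PySem.Set Int :=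
  (ld.flatMap id).foldl (pvStep k) []

-- the common canonical value
def pvT (ld : List (List (String × List Int))) : List (String × List Int) :=
  ((PySem.Set.ofList (pvKS ld)).filter
      (fun k => decide (2 * (((pvKS ld).count k : Nat) : Int) ≥ (ld.length : Int)))).map
    (fun k => (k, pvU ld k))

-- ---- B-side lemmas ----

lemma pv_union_empty (v : List Int) :
    PySem.Set.union ([] : PySem.Set Int) (PySem.Set.ofList v) = PySem.Set.ofList v := by
  simp [PySem.Set.union, PySem.Set.update_nil_left, PySem.Set.ofList_ofList]

lemma pv_cnt_getD (ps : List (String × List Int)) (k : String) :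
    ∀ d : PySem.Dict String Int,
      (ps.foldl (fun d p => d.insert p.1 (d.getD p.1 0 + 1)) d).getD k 0
        = d.getD k 0 + ((ps.map Prod.fst).count k : Int) := by
  induction ps with
  | nil => intro d; simp
  | cons p rest ih =>
    intro d
    simp only [List.foldl_cons, ih, PySem.Dict.getD_insert, List.map_cons, List.count_cons]
    by_cases h : k = p.1
    · simp only [h, beq_self_eq_true, if_pos]
      push_cast; ring
    · simp [h, Ne.symm h]

lemma pv_un_getD (ps : List (String × List Int)) (k : String) :
    ∀ d : PySem.Dict String (PySem.Set Int),
      (ps.foldl (fun d p =>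
          d.insert p.1 (PySem.Set.union (d.getD p.1 []) (PySem.Set.ofList p.2))) d).getD k []
        = ps.foldl (pvStep k) (d.getD k []) := by
  induction ps with
  | nil => intro d; simp
  | cons p rest ih =>
    intro d
    simp only [List.foldl_cons, ih, PySem.Dict.getD_insert, pvStep]
    by_cases h : p.1 = k
    · simp [h]
    · simp [h, Ne.symm h]

lemma pv_B_eq_T (ld : List (List (String × List Int))) : es37_alt ld = pvT ld := by
  unfold es37_alt
  simp only []
  have hstep : (fun (st : PySem.Dict String Int × PySem.Dict String (PySem.Set Int))
      (kv : String × List Int) =>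
        (st.1.insert kv.1 (st.1.getD kv.1 0 + 1),
         if st.2.contains kv.1 then
           st.2.insert kv.1 (PySem.Set.union (st.2.getD kv.1 []) (PySem.Set.ofList kv.2))
         else
           st.2.insert kv.1 (PySem.Set.ofList kv.2)))
      = (fun st kv =>
        (st.1.insert kv.1 (st.1.getD kv.1 0 + 1),
         st.2.insert kv.1 (PySem.Set.union (st.2.getD kv.1 []) (PySem.Set.ofList kv.2)))) := by
    funext st kv
    by_cases h : st.2.contains kv.1 = true
    · simp [h]
    · have h' : st.2.contains kv.1 = false := by simpa using h
      simp [h', PySem.Dict.getD_of_not_contains _ _ h', pv_union_empty]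
  rw [hstep]
  have hflat := List.foldl_flatMap (f := id)
    (g := (fun (st : PySem.Dict String Int × PySem.Dict String (PySem.Set Int)) kv =>
        (st.1.insert kv.1 (st.1.getD kv.1 0 + 1),
         st.2.insert kv.1 (PySem.Set.union (st.2.getD kv.1 []) (PySem.Set.ofList kv.2)))))
    (l := ld)
    (init := ((PySem.Dict.empty, PySem.Dict.empty) :
      PySem.Dict String Int × PySem.Dict String (PySem.Set Int)))
  simp only [id_eq] at hflat
  rw [← hflat, PySem.List.foldl_prod_mk
    (fun (d : PySem.Dict String Int) (kv : String × List Int) =>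
      d.insert kv.1 (d.getD kv.1 0 + 1))
    (fun (d : PySem.Dict String (PySem.Set Int)) (kv : String × List Int) =>
      d.insert kv.1 (PySem.Set.union (d.getD kv.1 []) (PySem.Set.ofList kv.2)))]
  set ps := ld.flatMap id with hps
  have hkeys : (ps.foldl (fun d p =>
      d.insert p.1 (PySem.Set.union (d.getD p.1 []) (PySem.Set.ofList p.2)))
      (PySem.Dict.empty : PySem.Dict String (PySem.Set Int))).keys
      = PySem.Set.ofList (ps.map Prod.fst) := by
    rw [PySem.Dict.keys_foldl_insert_key ps Prod.fst
        (fun d p => PySem.Set.union (d.getD p.1 []) (PySem.Set.ofList p.2))]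
    simp [PySem.Dict.keys, PySem.Dict.empty, PySem.Set.update_nil_left]
  have hnd : (ps.foldl (fun d p =>
      d.insert p.1 (PySem.Set.union (d.getD p.1 []) (PySem.Set.ofList p.2)))
      (PySem.Dict.empty : PySem.Dict String (PySem.Set Int))).keys.Nodup := by
    rw [hkeys]; exact PySem.Set.nodup_ofList _
  rw [PySem.Dict.items_eq_map_keys _ hnd ([] : PySem.Set Int), hkeys]
  rw [List.filter_map]
  unfold pvT pvKS pvU
  rw [← hps]
  have hfun : (fun k => (k,
      (ps.foldl (fun d p =>
          d.insert p.1 (PySem.Set.union (d.getD p.1 []) (PySem.Set.ofList p.2)))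
        (PySem.Dict.empty : PySem.Dict String (PySem.Set Int))).getD k []))
      = fun k => (k, ps.foldl (pvStep k) ([] : PySem.Set Int)) := by
    funext k
    rw [pv_un_getD]
    simp [PySem.Dict.getD_empty]
  rw [hfun]
  apply congrArg
  apply List.filter_congr
  intro k _
  simp only [Function.comp]
  rw [pv_cnt_getD]
  simp [PySem.Dict.getD_empty]

-- ---- A-side lemmas ----

lemma pv_count_mk (diz : List (String × List Int)) (k : String)
    (h : (diz.map Prod.fst).Nodup) :
    ((diz.map Prod.fst).count k : Int)
      = if (PySem.Dict.mk diz).contains k then 1 else 0 := by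
  have hc : (PySem.Dict.mk diz).contains k = decide (k ∈ diz.map Prod.fst) := by
    rw [PySem.Dict.contains_eq_decide_mem_keys]
    simp [PySem.Dict.keys]
  rw [hc]
  by_cases hm : k ∈ diz.map Prod.fst
  · simp [hm, List.count_eq_one_of_mem h hm]
  · simp [hm, List.count_eq_zero_of_not_mem hm]

lemma pv_KS_count (ld : List (List (String × List Int))) (k : String)
    (hpre : Pre_es37 ld) :
    (((pvKS ld).count k : Nat) : Int)
      = ld.foldl (fun c diz => if (PySem.Dict.mk diz).contains k then c + 1 else c) 0 := by
  rw [PySem.List.foldl_count_if (fun diz => (PySem.Dict.mk diz).contains k) ld 0]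
  induction ld with
  | nil => simp [pvKS]
  | cons diz rest ih =>
    have hnd := hpre diz (by simp)
    have hrest : Pre_es37 rest := fun d hd => hpre d (by simp [hd])
    simp only [pvKS, List.flatMap_cons, id, List.map_append, List.count_append,
      List.countP_cons] at *
    rw [Nat.cast_add, ih hrest, pv_count_mk diz k hnd]
    by_cases h : (PySem.Dict.mk diz).contains k = true
    · simp [h]; ring
    · simp [h]

lemma pv_foldl_step_skip (k : String) :
    ∀ (l : List (String × List Int)) (s : PySem.Set Int),
      (∀ q ∈ l, q.1 ≠ k) → l.foldl (pvStep k) s = s := by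
  intro l
  induction l with
  | nil => intro s _; simp
  | cons q r ih =>
    intro s hq
    simp only [List.foldl_cons, pvStep]
    rw [if_neg (by simpa using hq q (by simp)), ih s (fun q' hq' => hq q' (by simp [hq']))]

lemma pv_sett_dict (k : String) (diz : List (String × List Int))
    (h : (diz.map Prod.fst).Nodup) (s : PySem.Set Int) :
    diz.foldl (pvStep k) s
      = if (PySem.Dict.mk diz).contains k then
          PySem.Set.union s (PySem.Set.ofList ((PySem.Dict.mk diz).getD k []))
        else s := by
  induction diz generalizing s with
  | nil => simp [PySem.Dict.contains_mk]
  | cons p rest ih =>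
    obtain ⟨a, v⟩ := p
    have hnd : (rest.map Prod.fst).Nodup := (List.nodup_cons.mp h).2
    by_cases hk : a = k
    · have hnotin : ∀ q ∈ rest, q.1 ≠ k := by
        intro q hq hqk
        exact (List.nodup_cons.mp h).1
          (List.mem_map.mpr ⟨q, hq, hqk.trans hk.symm⟩)
      simp only [List.foldl_cons, pvStep]
      rw [if_pos (by simp [hk]), pv_foldl_step_skip k rest _ hnotin]
      rw [if_pos (by simp [PySem.Dict.contains_mk, hk])]
      have hget : (PySem.Dict.mk ((a, v) :: rest)).getD k [] = v := by
        simp [PySem.Dict.getD, PySem.Dict.get?_mk_cons, hk]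
      rw [hget]
    · simp only [List.foldl_cons, pvStep]
      rw [if_neg (by simpa using hk), ih hnd]
      have hcont : (PySem.Dict.mk ((a, v) :: rest)).contains k
          = (PySem.Dict.mk rest).contains k := by
        simp [PySem.Dict.contains_mk, hk]
      have hgetD : (PySem.Dict.mk ((a, v) :: rest)).getD k []
          = (PySem.Dict.mk rest).getD k [] := by
        simp [PySem.Dict.getD, PySem.Dict.get?_mk_cons, hk]
      rw [hcont, hgetD]

lemma pv_sett_eq_U (ld : List (List (String × List Int))) (k : String)
    (hpre : Pre_es37 ld) :
    ld.foldl (fun s diz =>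
        if (PySem.Dict.mk diz).contains k then
          PySem.Set.union s (PySem.Set.ofList ((PySem.Dict.mk diz).getD k []))
        else s) PySem.Set.empty
      = pvU ld k := by
  unfold pvU
  rw [List.foldl_flatMap (f := id)]
  apply PySem.List.foldl_congr_mem
  intro s diz hd
  exact (pv_sett_dict k diz (hpre diz hd) s).symm

lemma pv_items_foldl_insert (F : String → PySem.Set Int) (ks : List String) :
    ((ks.foldl (fun d key => d.insert key (F key))
        (PySem.Dict.empty : PySem.Dict String (PySem.Set Int))).items)
      = (PySem.Set.ofList ks).map (fun k => (k, F k)) := by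
  induction ks using List.reverseRecOn with
  | nil => simp [PySem.Dict.empty, PySem.Set.ofList]
  | append_singleton ks k ih =>
    rw [List.foldl_append, List.foldl_cons, List.foldl_nil, PySem.Set.ofList_append_singleton]
    set d := ks.foldl (fun d key => d.insert key (F key))
      (PySem.Dict.empty : PySem.Dict String (PySem.Set Int)) with hd
    have hkeys : d.keys = PySem.Set.ofList ks := by
      have hk0 : d.keys = d.items.map (fun p => p.1) := rfl
      rw [hk0, ih, List.map_map]
      exact List.map_id _
    by_cases hm : k ∈ PySem.Set.ofList ks
    · have hcont : d.contains k = true := by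
        rw [PySem.Dict.contains_iff_mem_keys, hkeys]; exact hm
      rw [PySem.Dict.items_insert_of_contains d (F k) hcont, ih,
        PySem.Set.add_of_mem hm, List.map_map]
      apply List.map_congr_left
      intro k' _
      by_cases h : k' = k <;> simp [h]
    · have hcont : d.contains k = false := by
        rw [← Bool.not_eq_true, PySem.Dict.contains_iff_mem_keys, hkeys]; exact hm
      rw [PySem.Dict.items_insert_of_not_contains d (F k) hcont, ih,
        PySem.Set.add_of_not_mem hm, List.map_append]
      simp

lemma pv_ofList_filter (p : String → Bool) (xs : List String) :
    PySem.Set.ofList (xs.filter p) = (PySem.Set.ofList xs).filter p := by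
  induction xs using List.reverseRecOn with
  | nil => simp [PySem.Set.ofList]
  | append_singleton xs x ih =>
    rw [List.filter_append, PySem.Set.ofList_append_singleton]
    by_cases hp : p x = true
    · have hfx : List.filter p [x] = [x] := by simp [hp]
      rw [hfx, PySem.Set.ofList_append_singleton, ih]
      by_cases hm : x ∈ PySem.Set.ofList xs
      · have hmf : x ∈ (PySem.Set.ofList xs).filter p := List.mem_filter.mpr ⟨hm, hp⟩
        rw [PySem.Set.add_of_mem hm, PySem.Set.add_of_mem hmf]
      · have hmf : x ∉ (PySem.Set.ofList xs).filter p := fun h => hm (List.mem_filter.mp h).1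
        rw [PySem.Set.add_of_not_mem hmf, PySem.Set.add_of_not_mem hm, List.filter_append, hfx]
    · have hp' : p x = false := by simpa using hp
      have hfx : List.filter p [x] = [] := by simp [hp']
      rw [hfx, List.append_nil, ih]
      by_cases hm : x ∈ PySem.Set.ofList xs
      · rw [PySem.Set.add_of_mem hm]
      · rw [PySem.Set.add_of_not_mem hm, List.filter_append, hfx, List.append_nil]

lemma pv_A_eq_T (ld : List (List (String × List Int))) (hpre : Pre_es37 ld) :
    es37 ld = pvT ld := by
  unfold es37
  simp only []
  rw [PySem.List.foldl_append_eq_flatMap (fun elem => (PySem.Dict.mk elem).keys) ld []]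
  have hfil := PySem.List.foldl_append_if (fun key => es37_good ld.length key ld) id
    (([] : List String) ++ ld.flatMap (fun elem => (PySem.Dict.mk elem).keys)) []
  simp only [id_eq, List.map_id] at hfil
  rw [hfil, List.nil_append, List.nil_append]
  rw [pv_items_foldl_insert]
  have hflat : ld.flatMap (fun elem => (PySem.Dict.mk elem).keys) = pvKS ld := by
    unfold pvKS
    rw [List.map_flatMap]
    apply List.flatMap_congr
    intro diz _
    simp [PySem.Dict.keys]
  rw [hflat]
  have hgood : ∀ k, es37_good ld.length k ld
      = decide (2 * (((pvKS ld).count k : Nat) : Int) ≥ (ld.length : Int)) := by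
    intro k
    unfold es37_good
    simp only []
    rw [pv_KS_count ld k hpre]
  have hfilter : (pvKS ld).filter (fun key => es37_good ld.length key ld)
      = (pvKS ld).filter
          (fun k => decide (2 * (((pvKS ld).count k : Nat) : Int) ≥ (ld.length : Int))) := by
    apply List.filter_congr; intro k _; rw [hgood]
  rw [hfilter, pv_ofList_filter]
  unfold pvT
  apply List.map_congr_left
  intro k _
  rw [pv_sett_eq_U ld k hpre]

-- ===== VERDICT (by name: the statement is the Claim_ definition above) =====
theorem es37_spec : Claim_equal_es37 := by
  intro ld _ hpre
  unfold Spec_es37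
  rw [pv_A_eq_T ld hpre, pv_B_eq_T ld]
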